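-- pv_equiv track=rewrite | github.com/engenharia10/senha-acesso | senha.py | gerar_senha_de_serial
-- ===== SOURCE A (Python) =====
-- def gerar_senha_de_serial(serial_hd):
--     """Gera senha de 6 dígitos a partir do serial do HD"""
--     if not serial_hd:
--         return None
--
--     serial_bytes = serial_hd.encode('utf-8')
--
--     cpu_id0 = 0
--     cpu_id1 = 0
--     cpu_id2 = 0
--
--     for i, byte in enumerate(serial_bytes):
--         if i % 3 == 0:
--             cpu_id0 = (cpu_id0 << 8) | byte
--             cpu_id0 = cpu_id0 & 0xFFFFFFFF
--         elif i % 3 == 1: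
--             cpu_id1 = (cpu_id1 << 8) | byte
--             cpu_id1 = cpu_id1 & 0xFFFFFFFF
--         else:
--             cpu_id2 = (cpu_id2 << 8) | byte
--             cpu_id2 = cpu_id2 & 0xFFFFFFFF
--
--     temp = cpu_id0
--     temp ^= (cpu_id1 << 11) & 0xFFFFFFFFFFFFFFFF
--     temp ^= (cpu_id2 << 22) & 0xFFFFFFFFFFFFFFFF
--     temp = ((temp >> 32) ^ (temp & 0xFFFFFFFF)) & 0xFFFFFFFF
--     temp = (temp * 2654435761) & 0xFFFFFFFF
--     senha = temp % 1000000
--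
--     return senha
-- ===== SOURCE B (Python) =====
-- def gerar_senha_de_serial(serial_hd):
--     """Gera senha de 6 digitos a partir do serial do HD (reimplementacao por fatias com passo 3)"""
--     if not serial_hd:
--         return None
--
--     serial_bytes = serial_hd.encode('utf-8')
--
--     # each accumulator only ever keeps the last 4 bytes of its strided group
--     ids = [int.from_bytes(serial_bytes[k::3][-4:], 'big') for k in range(3)]
--
--     temp = ids[0]
--     temp ^= (ids[1] << 11) & 0xFFFFFFFFFFFFFFFF
--     temp ^= (ids[2] << 22) & 0xFFFFFFFFFFFFFFFF
--     temp = ((temp >> 32) ^ (temp & 0xFFFFFFFF)) & 0xFFFFFFFF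
--     temp = (temp * 2654435761) & 0xFFFFFFFF
--     return temp % 1000000
-- ===== Notes on version B (the rewrite author's own statement) =====
-- stated objective: faster
-- what changed: Replaces the per-byte enumerate loop with three interleaved shift-and-mask accumulators by slicing the bytes into three strided groups (serial_bytes[k::3]) and reading each accumulator directly as the big-endian value of that group's last 4 bytes (the 0xFFFFFFFF mask keeps exactly those).
import Mathlib
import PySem

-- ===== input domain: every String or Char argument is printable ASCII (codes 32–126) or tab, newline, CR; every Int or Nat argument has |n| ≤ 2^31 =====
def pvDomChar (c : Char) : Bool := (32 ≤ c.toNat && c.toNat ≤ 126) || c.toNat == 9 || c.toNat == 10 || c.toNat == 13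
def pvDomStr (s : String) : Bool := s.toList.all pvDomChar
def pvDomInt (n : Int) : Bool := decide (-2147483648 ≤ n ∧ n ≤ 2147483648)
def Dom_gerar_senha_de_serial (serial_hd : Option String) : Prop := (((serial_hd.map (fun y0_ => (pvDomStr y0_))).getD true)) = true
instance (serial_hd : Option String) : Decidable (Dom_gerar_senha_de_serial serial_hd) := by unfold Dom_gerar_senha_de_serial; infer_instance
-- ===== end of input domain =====

-- B replaces A's per-byte enumerate loop (three interleaved shift-mask accumulators) by slicing the
-- bytes into three strided groups and reading each accumulator as the big-endian value of the
-- group's last 4 bytes; objective: faster (C-level slicing/int.from_bytes replaces the per-byte Python loop; same O(n)).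


-- ===== PORT A =====
-- the 'for i, byte in enumerate(serial_bytes)' loop carrying (i, cpu_id0, cpu_id1, cpu_id2)
def pvLoopA : List Nat → Nat → Nat → Nat → Nat → Nat × Nat × Nat
  | [], _, c0, c1, c2 => (c0, c1, c2)
  | b :: bs, i, c0, c1, c2 =>
    if i % 3 = 0 then pvLoopA bs (i+1) (((c0 <<< 8) ||| b) &&& 0xFFFFFFFF) c1 c2
    else if i % 3 = 1 then pvLoopA bs (i+1) c0 (((c1 <<< 8) ||| b) &&& 0xFFFFFFFF) c2
    else pvLoopA bs (i+1) c0 c1 (((c2 <<< 8) ||| b) &&& 0xFFFFFFFF)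

-- 'serial_hd.encode("utf-8")' is ported as the list of char codes: exact on the ASCII Dom_.
def gerar_senha_de_serial (serial_hd : Option String) : Option Int :=
  match serial_hd with
  | none => none
  | some s =>
    if s.toList.isEmpty then none
    else
      let serial_bytes : List Nat := s.toList.map Char.toNat
      let cs := pvLoopA serial_bytes 0 0 0 0
      let temp0 := cs.1 ^^^ ((cs.2.1 <<< 11) &&& 0xFFFFFFFFFFFFFFFF)
      let temp1 := temp0 ^^^ ((cs.2.2 <<< 22) &&& 0xFFFFFFFFFFFFFFFF)
      let temp2 := ((temp1 >>> 32) ^^^ (temp1 &&& 0xFFFFFFFF)) &&& 0xFFFFFFFF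
      let temp3 := (temp2 * 2654435761) &&& 0xFFFFFFFF
      some ((temp3 % 1000000 : Nat) : Int)

-- ===== PORT B =====
-- sb[k::3] (nonnegative start, step 3) ported by hand, exact for these bounds
def pvEvery3 : List Nat → List Nat
  | [] => []
  | b :: bs => b :: pvEvery3 (bs.drop 2)
termination_by l => l.length
decreasing_by simp

-- l[-4:] on a list of length ≤ anything: the last (at most) 4 elements
def pvLast4 (l : List Nat) : List Nat := l.drop (l.length - 4)

-- int.from_bytes(l, 'big')
def pvFromBytesBE (l : List Nat) : Nat := l.foldl (fun a b => a * 256 + b) 0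

def gerar_senha_de_serial_alt (serial_hd : Option String) : Option Int :=
  match serial_hd with
  | none => none
  | some s =>
    if s.toList.isEmpty then none
    else
      let serial_bytes : List Nat := s.toList.map Char.toNat
      let ids := (List.range 3).map (fun k => pvFromBytesBE (pvLast4 (pvEvery3 (serial_bytes.drop k))))
      let temp0 := ids.getD 0 0 ^^^ ((ids.getD 1 0 <<< 11) &&& 0xFFFFFFFFFFFFFFFF)
      let temp1 := temp0 ^^^ ((ids.getD 2 0 <<< 22) &&& 0xFFFFFFFFFFFFFFFF)
      let temp2 := ((temp1 >>> 32) ^^^ (temp1 &&& 0xFFFFFFFF)) &&& 0xFFFFFFFF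
      let temp3 := (temp2 * 2654435761) &&& 0xFFFFFFFF
      some ((temp3 % 1000000 : Nat) : Int)

-- ===== PRECONDITION & SPEC =====
def Spec_gerar_senha_de_serial (serial_hd : Option String) (out : Option Int) : Prop := out = gerar_senha_de_serial_alt serial_hd
instance (serial_hd : Option String) (out : Option Int) : Decidable (Spec_gerar_senha_de_serial serial_hd out) := by unfold Spec_gerar_senha_de_serial; infer_instance

-- ===== CLAIM (what is proved, stated in full; the proofs are below) =====
def Claim_equal_gerar_senha_de_serial : Prop := ∀ (serial_hd : Option String), Dom_gerar_senha_de_serial serial_hd → Spec_gerar_senha_de_serial serial_hd (gerar_senha_de_serial serial_hd)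

-- ===== LEMMAS AND PROOFS =====

-- A's per-index accumulator update
def pvStep (c b : Nat) : Nat := ((c <<< 8) ||| b) &&& 0xFFFFFFFF

-- the unmasked base-256 accumulator
def pvM (a b : Nat) : Nat := a * 256 + b

-- distribute a list over the three accumulators by index remainder, starting at index i
lemma pvEvery3_nil : pvEvery3 [] = [] := by rw [pvEvery3]

lemma pvEvery3_cons (b : Nat) (bs : List Nat) : pvEvery3 (b :: bs) = b :: pvEvery3 (bs.drop 2) := by
  rw [pvEvery3]

def pvSplit3 : List Nat → Nat → List Nat × List Nat × List Nat
  | [], _ => ([], [], [])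
  | b :: bs, i =>
    let g := pvSplit3 bs (i+1)
    if i % 3 = 0 then (b :: g.1, g.2.1, g.2.2)
    else if i % 3 = 1 then (g.1, b :: g.2.1, g.2.2)
    else (g.1, g.2.1, b :: g.2.2)

lemma pvLoopA_eq : ∀ (bs : List Nat) (i c0 c1 c2 : Nat),
    pvLoopA bs i c0 c1 c2 =
      ((pvSplit3 bs i).1.foldl pvStep c0,
       (pvSplit3 bs i).2.1.foldl pvStep c1,
       (pvSplit3 bs i).2.2.foldl pvStep c2) := by
  intro bs
  induction bs with
  | nil => intro i c0 c1 c2; simp [pvLoopA, pvSplit3]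
  | cons b bs ih =>
    intro i c0 c1 c2
    simp only [pvLoopA, pvSplit3]
    split_ifs with h0 h1 <;> simp [ih, pvStep]

lemma pvSplit3_spec : ∀ (bs : List Nat) (i : Nat),
    pvSplit3 bs i =
      if i % 3 = 0 then (pvEvery3 bs, pvEvery3 (bs.drop 1), pvEvery3 (bs.drop 2))
      else if i % 3 = 1 then (pvEvery3 (bs.drop 2), pvEvery3 bs, pvEvery3 (bs.drop 1))
      else (pvEvery3 (bs.drop 1), pvEvery3 (bs.drop 2), pvEvery3 bs) := by
  intro bs
  induction bs with
  | nil => intro i; simp [pvSplit3, pvEvery3_nil]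
  | cons b bs ih =>
    intro i
    have h3 : i % 3 = 0 ∨ i % 3 = 1 ∨ i % 3 = 2 := by omega
    simp only [pvSplit3, ih (i+1)]
    rcases h3 with h | h | h <;>
      · have h' : (i+1) % 3 = (i % 3 + 1) % 3 := by omega
        simp [h, h', pvEvery3_cons]

lemma pvStep_eq (c b : Nat) (hb : b < 256) : pvStep c b = (c * 256 + b) % 2 ^ 32 := by
  have hb' : b < 2 ^ 8 := by omega
  show ((c <<< 8) ||| b) &&& 0xFFFFFFFF = (c * 256 + b) % 2 ^ 32
  rw [← Nat.shiftLeft_add_eq_or_of_lt hb']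
  have : (0xFFFFFFFF : Nat) = 2 ^ 32 - 1 := by norm_num
  rw [this, Nat.and_two_pow_sub_one_eq_mod, Nat.shiftLeft_eq]

lemma pvFold_step_mod : ∀ (l : List Nat) (x : Nat), (∀ b ∈ l, b < 256) →
    l.foldl pvStep (x % 2 ^ 32) = (l.foldl pvM x) % 2 ^ 32 := by
  intro l
  induction l with
  | nil => intro x _; simp
  | cons b bs ih =>
    intro x hall
    have hb : b < 256 := hall b (by simp)
    have h1 : pvStep (x % 2 ^ 32) b = (x * 256 + b) % 2 ^ 32 := by
      rw [pvStep_eq _ _ hb]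
      exact ((Nat.mod_modEq x (2 ^ 32)).mul_right 256).add_right b
    simp only [List.foldl_cons, h1]
    rw [ih (x * 256 + b) (fun b' hb' => hall b' (by simp [hb']))]
    rfl

lemma pvFold_m_shift : ∀ (v : List Nat) (x : Nat),
    v.foldl pvM x = x * 256 ^ v.length + v.foldl pvM 0 := by
  intro v
  induction v with
  | nil => intro x; simp
  | cons b bs ih =>
    intro x
    simp only [List.foldl_cons, List.length_cons]
    rw [ih (pvM x b), ih (pvM 0 b)]
    simp only [pvM]
    ring

lemma pvFold_m_lt : ∀ (v : List Nat), (∀ b ∈ v, b < 256) → v.foldl pvM 0 < 256 ^ v.length := by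
  intro v
  induction v with
  | nil => intro _; simp
  | cons b bs ih =>
    intro hall
    have hb : b < 256 := hall b (by simp)
    have hbs := ih (fun b' hb' => hall b' (by simp [hb']))
    simp only [List.foldl_cons, List.length_cons]
    rw [pvFold_m_shift bs (pvM 0 b)]
    have : pvM 0 b = b := by simp [pvM]
    rw [this]
    calc b * 256 ^ bs.length + bs.foldl pvM 0
        < b * 256 ^ bs.length + 256 ^ bs.length := by omega
      _ = (b + 1) * 256 ^ bs.length := by ring
      _ ≤ 256 * 256 ^ bs.length := by
          exact Nat.mul_le_mul_right _ (by omega)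
      _ = 256 ^ (bs.length + 1) := by ring

lemma pvFold_m_last4 (l : List Nat) (hall : ∀ b ∈ l, b < 256) :
    (l.foldl pvM 0) % 2 ^ 32 = pvFromBytesBE (pvLast4 l) := by
  have hM : (2 ^ 32 : Nat) = 256 ^ 4 := by norm_num
  have hfb : pvFromBytesBE (pvLast4 l) = (l.drop (l.length - 4)).foldl pvM 0 := rfl
  rw [hfb]
  by_cases h4 : l.length ≤ 4
  · have : l.length - 4 = 0 := by omega
    rw [this, List.drop_zero]
    apply Nat.mod_eq_of_lt
    calc l.foldl pvM 0 < 256 ^ l.length := pvFold_m_lt l hall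
      _ ≤ 256 ^ 4 := Nat.pow_le_pow_right (by omega) h4
      _ = 2 ^ 32 := by norm_num
  · have hsplit : l = l.take (l.length - 4) ++ l.drop (l.length - 4) := (List.take_append_drop _ _).symm
    have hlen : (l.drop (l.length - 4)).length = 4 := by
      rw [List.length_drop]; omega
    conv_lhs => rw [hsplit]
    rw [List.foldl_append, pvFold_m_shift (l.drop (l.length - 4)), hlen, hM]
    have hFlt := pvFold_m_lt (l.drop (l.length - 4)) (fun b hb => hall b (List.mem_of_mem_drop hb))
    rw [hlen] at hFlt
    have h256 : (256 : Nat) ^ 4 = 4294967296 := by norm_num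
    rw [h256] at hFlt ⊢
    omega

lemma pvMem_every3 : ∀ (l : List Nat) (a : Nat), a ∈ pvEvery3 l → a ∈ l
  | [] => by intro a h; rw [pvEvery3_nil] at h; simp at h
  | b :: bs => by
    intro a h
    rw [pvEvery3_cons] at h
    rcases List.mem_cons.mp h with h | h
    · simp [h]
    · exact List.mem_cons_of_mem b (List.mem_of_mem_drop (pvMem_every3 (bs.drop 2) a h))
termination_by l => l.length
decreasing_by simp

lemma pvCpu_eq (l : List Nat) (hall : ∀ b ∈ l, b < 256) :
    (pvEvery3 l).foldl pvStep 0 = pvFromBytesBE (pvLast4 (pvEvery3 l)) := by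
  have hsub : ∀ b ∈ pvEvery3 l, b < 256 := fun b hb => hall b (pvMem_every3 l b hb)
  have h0 : (0 : Nat) = 0 % 2 ^ 32 := by norm_num
  calc (pvEvery3 l).foldl pvStep 0
      = (pvEvery3 l).foldl pvStep (0 % 2 ^ 32) := by rw [← h0]
    _ = ((pvEvery3 l).foldl pvM 0) % 2 ^ 32 := pvFold_step_mod _ 0 hsub
    _ = pvFromBytesBE (pvLast4 (pvEvery3 l)) := pvFold_m_last4 _ hsub

-- ===== VERDICT (by name: the statement is the Claim_ definition above) =====
theorem gerar_senha_de_serial_spec : Claim_equal_gerar_senha_de_serial := by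
  intro serial_hd hdom
  unfold Spec_gerar_senha_de_serial
  cases serial_hd with
  | none => rfl
  | some s =>
    simp only [gerar_senha_de_serial, gerar_senha_de_serial_alt]
    by_cases he : s.toList.isEmpty
    · simp [he]
    · simp only [he]
      have hall : ∀ b ∈ s.toList.map Char.toNat, b < 256 := by
        intro b hb
        rcases List.mem_map.mp hb with ⟨c, hc, rfl⟩
        have : pvDomChar c = true := by
          have := hdom
          unfold Dom_gerar_senha_de_serial at this
          simp only [Option.map_some, Option.getD_some] at this
          exact List.all_eq_true.mp this c hc
        unfold pvDomChar at this
        simp at this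
        omega
    -- continue below
      set bs := s.toList.map Char.toNat with hbs
      have hcpu : pvLoopA bs 0 0 0 0 =
          (pvFromBytesBE (pvLast4 (pvEvery3 (bs.drop 0))),
           pvFromBytesBE (pvLast4 (pvEvery3 (bs.drop 1))),
           pvFromBytesBE (pvLast4 (pvEvery3 (bs.drop 2)))) := by
        rw [pvLoopA_eq, pvSplit3_spec]
        simp only [Nat.zero_mod, if_true, List.drop_zero]
        have h0 : ∀ b ∈ bs, b < 256 := hall
        have h1 : ∀ b ∈ bs.drop 1, b < 256 := fun b hb => hall b (List.mem_of_mem_drop hb)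
        have h2 : ∀ b ∈ bs.drop 2, b < 256 := fun b hb => hall b (List.mem_of_mem_drop hb)
        rw [pvCpu_eq bs h0, pvCpu_eq (bs.drop 1) h1, pvCpu_eq (bs.drop 2) h2]
      rw [hcpu]
      simp [List.range, List.range.loop]
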